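-- pv_equiv track=rewrite | github.com/iridescent99/codeforces | 1000/unfinished/2124B/main.py | minimise_sum
-- ===== SOURCE A (Python) =====
-- def minimise_sum(n, arr):
--     prefMin = [0] * n
--     prefMin[0] = arr[0]
--     existsSafePrefix = [False] * n
--     suffixSum = [0] * (n+1)
--     suffixSum[n] = 0
--     for i in range(1, n):
--         prefMin[i] = min(prefMin[i-1], arr[i])
--         existsSafePrefix[i] = existsSafePrefix[i-1] or arr[i] > prefMin[i-1]
--     for i in range(n-1, -1, -1):
--         suffixSum[i] = prefMin[i] + suffixSum[i+1]
--     total = suffixSum[0]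
--     bestValue = total
--     for i in range(1,n):
--         if existsSafePrefix[i-1]:
--             candidate = total - suffixSum[i]
--             if candidate < bestValue:
--                 bestValue = candidate
--     return bestValue
-- ===== SOURCE B (Python) =====
-- def minimise_sum(n, arr):
--     # single pass, O(1) extra space: running prefix-min, running sum of prefix-mins,
--     # one 'safe' flag, and the best candidate seen so far (None = no candidate yet)
--     curMin = arr[0]
--     prefixSum = arr[0]
--     safe = False
--     best = None
--     for i in range(1, n):
--         if safe and (best is None or prefixSum < best):
--             best = prefixSum
--         safe = safe or arr[i] > curMin
--         if arr[i] < curMin: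
--             curMin = arr[i]
--         prefixSum += curMin
--     if best is not None and best < prefixSum:
--         return best
--     return prefixSum
-- ===== Notes on version B (the rewrite author's own statement) =====
-- stated objective: simpler
-- what changed: B replaces A's three passes and three O(n) tables (prefix-min array, safe-prefix array, suffix-sum array) by one left-to-right pass keeping four scalars: the running prefix minimum, the running sum of prefix minimums, one safe flag, and the best candidate so far.
import Mathlib
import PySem

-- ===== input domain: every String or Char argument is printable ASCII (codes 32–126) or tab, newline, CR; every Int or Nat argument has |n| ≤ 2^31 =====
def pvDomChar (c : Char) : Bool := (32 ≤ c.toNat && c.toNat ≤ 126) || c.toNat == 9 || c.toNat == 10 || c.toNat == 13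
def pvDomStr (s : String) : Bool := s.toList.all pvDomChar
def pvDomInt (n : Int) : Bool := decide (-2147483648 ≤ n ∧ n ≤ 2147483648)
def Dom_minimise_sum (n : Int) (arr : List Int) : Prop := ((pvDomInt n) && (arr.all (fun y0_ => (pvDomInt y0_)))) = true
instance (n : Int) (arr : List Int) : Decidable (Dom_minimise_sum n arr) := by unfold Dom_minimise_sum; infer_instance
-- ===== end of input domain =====

-- B replaces A's three passes over three O(n) tables by one pass over four scalars; return values agree on Pre_.

-- ===== PORT A =====
-- body of A's first loop: prefMin[i] = min(prefMin[i-1], arr[i]); existsSafePrefix[i] = existsSafePrefix[i-1] or arr[i] > prefMin[i-1]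
def stepA1 (arr : List Int) (st : List Int × List Bool) (i : Int) : List Int × List Bool :=
  let pm := PySem.List.pySetD st.1 i (min (PySem.List.pyGetD st.1 (i-1) 0) (PySem.List.pyGetD arr i 0))
  let es := PySem.List.pySetD st.2 i
      (PySem.List.pyGetD st.2 (i-1) false || decide (PySem.List.pyGetD arr i 0 > PySem.List.pyGetD pm (i-1) 0))
  (pm, es)

-- body of A's second loop: suffixSum[i] = prefMin[i] + suffixSum[i+1]
def stepA2 (pm : List Int) (ss : List Int) (i : Int) : List Int :=
  PySem.List.pySetD ss i (PySem.List.pyGetD pm i 0 + PySem.List.pyGetD ss (i+1) 0)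

-- body of A's third loop: if existsSafePrefix[i-1]: candidate = total - suffixSum[i]; keep if < bestValue
def stepA3 (es : List Bool) (ss : List Int) (total : Int) (best : Int) (i : Int) : Int :=
  if PySem.List.pyGetD es (i-1) false then
    if total - PySem.List.pyGetD ss i 0 < best then total - PySem.List.pyGetD ss i 0 else best
  else best

def minimise_sum (n : Int) (arr : List Int) : Int :=
  let prefMin := PySem.List.pySetD (List.replicate n.toNat (0:Int)) 0 (PySem.List.pyGetD arr 0 0)
  let existsSafePrefix := List.replicate n.toNat false
  let suffixSum := PySem.List.pySetD (List.replicate (n+1).toNat (0:Int)) n 0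
  let st := (PySem.List.pyRange 1 n 1).foldl (stepA1 arr) (prefMin, existsSafePrefix)
  let suffixSum := (PySem.List.pyRange (n-1) (-1) (-1)).foldl (stepA2 st.1) suffixSum
  let total := PySem.List.pyGetD suffixSum 0 0
  (PySem.List.pyRange 1 n 1).foldl (stepA3 st.2 suffixSum total) total

-- ===== PORT B =====
-- B's single loop body; state = (curMin, prefixSum, safe, best)
def stepB (arr : List Int) (st : Int × Int × Bool × Option Int) (i : Int) : Int × Int × Bool × Option Int :=
  let best := if st.2.2.1 && (match st.2.2.2 with | none => true | some b => decide (st.2.1 < b))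
              then some st.2.1 else st.2.2.2
  let ai := PySem.List.pyGetD arr i 0
  let safe := st.2.2.1 || decide (ai > st.1)
  let curMin := if ai < st.1 then ai else st.1
  (curMin, st.2.1 + curMin, safe, best)

def minimise_sum_alt (n : Int) (arr : List Int) : Int :=
  let a0 := PySem.List.pyGetD arr 0 0
  let st := (PySem.List.pyRange 1 n 1).foldl (stepB arr) (a0, a0, false, (none : Option Int))
  match st.2.2.2 with
  | none => st.2.1
  | some b => if b < st.2.1 then b else st.2.1

-- ===== PRECONDITION & SPEC =====
-- Pre_ excludes exactly the inputs where Python A raises IndexError: n < 1 (prefMin[0] on an empty table) or n > len(arr) (arr[i] out of range).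
def Pre_minimise_sum (n : Int) (arr : List Int) : Prop := 1 ≤ n ∧ n ≤ (arr.length : Int)
instance (n : Int) (arr : List Int) : Decidable (Pre_minimise_sum n arr) := by unfold Pre_minimise_sum; infer_instance
def pvWitness_minimise_sum : Int × List Int := (3, [2, 1, 3])
def Spec_minimise_sum (n : Int) (arr : List Int) (out : Int) : Prop := out = minimise_sum_alt n arr
instance (n : Int) (arr : List Int) (out : Int) : Decidable (Spec_minimise_sum n arr out) := by unfold Spec_minimise_sum; infer_instance

-- ===== CLAIM (what is proved, stated in full; the proofs are below) =====
def Claim_equal_minimise_sum : Prop := ∀ (n : Int) (arr : List Int), Dom_minimise_sum n arr → Pre_minimise_sum n arr → Spec_minimise_sum n arr (minimise_sum n arr)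

-- ===== LEMMAS AND PROOFS =====

-- arr[k] for a Nat index
def gA (arr : List Int) (k : Nat) : Int := PySem.List.pyGetD arr (k : Int) 0
-- prefix minimum of arr[0..k]
def pmF (arr : List Int) : Nat → Int
  | 0 => gA arr 0
  | k+1 => min (pmF arr k) (gA arr (k+1))
-- "exists safe prefix" flag after index k
def esF (arr : List Int) : Nat → Bool
  | 0 => false
  | k+1 => esF arr k || decide (gA arr (k+1) > pmF arr k)
-- sum of prefix minimums pmF 0 + … + pmF k
def SF (arr : List Int) : Nat → Int
  | 0 => pmF arr 0
  | k+1 => SF arr k + pmF arr (k+1)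

-- the contents of A's tables, as functions of how far the loops have progressed
def pmL (arr : List Int) (N j : Nat) : List Int := (List.range N).map (fun t => if t < j then pmF arr t else 0)
def esL (arr : List Int) (N j : Nat) : List Bool := (List.range N).map (fun t => if t < j then esF arr t else false)
def sfV (arr : List Int) (N k : Nat) : Int := SF arr (N-1) - (if k = 0 then 0 else SF arr (k-1))
def sfL (arr : List Int) (N j : Nat) : List Int := (List.range (N+1)).map (fun k => if j ≤ k then sfV arr N k else 0)

theorem read_mapRange {α : Type} (f : Nat → α) (N : Nat) (i : Int) (d : α) (h0 : 0 ≤ i) (h1 : i < (N:Int)) :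
    PySem.List.pyGetD ((List.range N).map f) i d = f i.toNat := by
  rw [PySem.List.pyGetD_eq_getElem _ d h0 (by simp; omega)]
  rw [List.getElem_map, List.getElem_range]

theorem set_mapRange {α : Type} (f : Nat → α) (N k : Nat) (v : α) :
    ((List.range N).map f).set k v = (List.range N).map (fun t => if t = k then v else f t) := by
  apply List.ext_getElem
  · simp
  · intro i h1 h2
    simp [List.getElem_set]
    split <;> rename_i h <;> simp [h]
    intro h'; omega

theorem pmL_succ (arr : List Int) (N k : Nat) : (pmL arr N k).set k (pmF arr k) = pmL arr N (k+1) := by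
  unfold pmL; rw [set_mapRange]; refine congrFun (congrArg List.map ?_) _; funext t
  by_cases h : t = k
  · simp [h]
  · simp only [h, if_false]
    by_cases h2 : t < k
    · rw [if_pos h2, if_pos (by omega)]
    · rw [if_neg h2, if_neg (by omega)]

theorem esL_succ (arr : List Int) (N k : Nat) : (esL arr N k).set k (esF arr k) = esL arr N (k+1) := by
  unfold esL; rw [set_mapRange]; refine congrFun (congrArg List.map ?_) _; funext t
  by_cases h : t = k
  · simp [h]
  · simp only [h, if_false]
    by_cases h2 : t < k
    · rw [if_pos h2, if_pos (by omega)]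
    · rw [if_neg h2, if_neg (by omega)]

theorem sfL_set (arr : List Int) (N k : Nat) : (sfL arr N (k+1)).set k (sfV arr N k) = sfL arr N k := by
  unfold sfL; rw [set_mapRange]; refine congrFun (congrArg List.map ?_) _; funext t
  by_cases h : t = k
  · simp [h]
  · simp only [h, if_false]
    by_cases h2 : k + 1 ≤ t
    · rw [if_pos h2, if_pos (by omega)]
    · rw [if_neg h2, if_neg (by omega)]

theorem loop1 (arr : List Int) (n j : Int) (h1 : 1 ≤ j) (h2 : j ≤ n) :
    (PySem.List.pyRange j n 1).foldl (stepA1 arr) (pmL arr n.toNat j.toNat, esL arr n.toNat j.toNat)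
      = (pmL arr n.toNat n.toNat, esL arr n.toNat n.toNat) := by
  obtain ⟨m, hm⟩ : ∃ m, (n - j).toNat = m := ⟨_, rfl⟩
  induction m generalizing j with
  | zero =>
    have hj : j = n := by omega
    subst hj
    rw [PySem.List.pyRange_one_eq_nil le_rfl, List.foldl_nil]
  | succ m ih =>
    rw [PySem.List.pyRange_one_cons (by omega), List.foldl_cons]
    have hstep : stepA1 arr (pmL arr n.toNat j.toNat, esL arr n.toNat j.toNat) j
        = (pmL arr n.toNat (j.toNat+1), esL arr n.toNat (j.toNat+1)) := by
      unfold stepA1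
      have e1 : PySem.List.pyGetD (pmL arr n.toNat j.toNat) (j-1) 0 = pmF arr (j-1).toNat := by
        unfold pmL; rw [read_mapRange _ _ _ _ (by omega) (by omega)]
        rw [if_pos (by omega)]
      have e2 : PySem.List.pyGetD arr j 0 = gA arr j.toNat := by
        unfold gA; rw [show ((j.toNat : Int)) = j by omega]
      simp only [e1, e2]
      rw [PySem.List.pySetD_of_nonneg _ _ (by omega)]
      rw [show min (pmF arr (j-1).toNat) (gA arr j.toNat) = pmF arr j.toNat by
        rw [show j.toNat = (j-1).toNat + 1 by omega]; simp [pmF]]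
      rw [pmL_succ]
      have e3 : PySem.List.pyGetD (pmL arr n.toNat (j.toNat+1)) (j-1) 0 = pmF arr (j-1).toNat := by
        unfold pmL; rw [read_mapRange _ _ _ _ (by omega) (by omega)]
        rw [if_pos (by omega)]
      have e4 : PySem.List.pyGetD (esL arr n.toNat j.toNat) (j-1) false = esF arr (j-1).toNat := by
        unfold esL; rw [read_mapRange _ _ _ _ (by omega) (by omega)]
        rw [if_pos (by omega)]
      simp only [e3, e4]
      rw [PySem.List.pySetD_of_nonneg _ _ (by omega)]
      rw [show (esF arr (j-1).toNat || decide (gA arr j.toNat > pmF arr (j-1).toNat)) = esF arr j.toNat by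
        rw [show j.toNat = (j-1).toNat + 1 by omega]; simp [esF]]
      rw [esL_succ]
    rw [hstep]
    have h' := ih (j+1) (by omega) (by omega) (by omega)
    rw [show (j+1).toNat = j.toNat + 1 by omega] at h'
    exact h' 

theorem sfV_rec (arr : List Int) (N k : Nat) : pmF arr k + sfV arr N (k+1) = sfV arr N k := by
  cases k with
  | zero => simp [sfV, SF]
  | succ t => simp [sfV, SF]; ring

theorem loop2 (arr : List Int) (n j : Int) (h0 : -1 ≤ j) (h2 : j ≤ n - 1) (h1 : 1 ≤ n) :
    (PySem.List.pyRange j (-1) (-1)).foldl (stepA2 (pmL arr n.toNat n.toNat)) (sfL arr n.toNat (j+1).toNat)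
      = sfL arr n.toNat 0 := by
  obtain ⟨m, hm⟩ : ∃ m, (j+1).toNat = m := ⟨_, rfl⟩
  induction m generalizing j with
  | zero =>
    rw [PySem.List.pyRange_neg_one_eq_nil (by omega), List.foldl_nil, hm]
  | succ m ih =>
    rw [PySem.List.pyRange_neg_one_cons (by omega), List.foldl_cons]
    have hstep : stepA2 (pmL arr n.toNat n.toNat) (sfL arr n.toNat (j+1).toNat) j = sfL arr n.toNat j.toNat := by
      unfold stepA2
      have e1 : PySem.List.pyGetD (pmL arr n.toNat n.toNat) j 0 = pmF arr j.toNat := by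
        unfold pmL; rw [read_mapRange _ _ _ _ (by omega) (by omega)]
        rw [if_pos (by omega)]
      have e2 : PySem.List.pyGetD (sfL arr n.toNat (j+1).toNat) (j+1) 0 = sfV arr n.toNat (j+1).toNat := by
        unfold sfL; rw [read_mapRange _ _ _ _ (by omega) (by omega)]
        rw [if_pos (by omega)]
      rw [e1, e2, PySem.List.pySetD_of_nonneg _ _ (by omega)]
      rw [show (j+1).toNat = j.toNat + 1 by omega, sfV_rec, sfL_set]
    rw [hstep]
    have h' := ih (j-1) (by omega) (by omega) (by omega)
    rw [show (j-1+1).toNat = j.toNat by omega] at h'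
    exact h' 

def finalizeB (st : Int × Int × Bool × Option Int) : Int :=
  match st.2.2.2 with
  | none => st.2.1
  | some b => if b < st.2.1 then b else st.2.1

-- proof-side name for B's candidate update
def updBest (c : Int) (safe : Bool) (bO : Option Int) : Option Int :=
  if safe && (match bO with | none => true | some b => decide (c < b)) then some c else bO

theorem updBest_def (c : Int) (safe : Bool) (bO : Option Int) :
    (if safe && (match bO with | none => true | some b => decide (c < b)) then some c else bO)
    = updBest c safe bO := rfl

theorem updR (T c bestA : Int) (safe : Bool) (bO : Option Int)
    (hR : bestA = (match bO with | none => T | some b => min T b)) :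
    (if safe then (if c < bestA then c else bestA) else bestA)
      = (match updBest c safe bO with | none => T | some b => min T b) := by
  subst hR
  cases safe with
  | false => simp [updBest]
  | true =>
    cases bO with
    | none =>
      rw [show updBest c true none = some c from rfl]
      rw [show (match (some c : Option Int) with | none => T | some b => min T b) = min T c from rfl]
      rw [show (match (none : Option Int) with | none => T | some b => min T b) = T from rfl]
      simp only [min_def]
      split_ifs <;> omega
    | some b =>
      rw [show (match (some b : Option Int) with | none => T | some b => min T b) = min T b from rfl]
      by_cases hcb : c < b
      · rw [show updBest c true (some b) = some c by simp [updBest, hcb]]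
        rw [show (match (some c : Option Int) with | none => T | some b => min T b) = min T c from rfl]
        simp only [min_def]
        split_ifs <;> omega
      · rw [show updBest c true (some b) = some b by simp [updBest, hcb]]
        rw [show (match (some b : Option Int) with | none => T | some b => min T b) = min T b from rfl]
        simp only [min_def]
        split_ifs <;> omega

theorem loop3 (arr : List Int) (n j : Int) (h1 : 1 ≤ j) (h2 : j ≤ n)
    (bestA : Int) (bO : Option Int)
    (hR : bestA = (match bO with | none => SF arr (n.toNat - 1) | some b => min (SF arr (n.toNat - 1)) b)) :
    (PySem.List.pyRange j n 1).foldl (stepA3 (esL arr n.toNat n.toNat) (sfL arr n.toNat 0) (SF arr (n.toNat - 1))) bestA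
      = finalizeB ((PySem.List.pyRange j n 1).foldl (stepB arr) (pmF arr (j-1).toNat, SF arr (j-1).toNat, esF arr (j-1).toNat, bO)) := by
  obtain ⟨m, hm⟩ : ∃ m, (n - j).toNat = m := ⟨_, rfl⟩
  induction m generalizing j bestA bO with
  | zero =>
    have hj : j = n := by omega
    rw [hj, PySem.List.pyRange_one_eq_nil le_rfl, List.foldl_nil, List.foldl_nil, hR,
        show (n-1).toNat = n.toNat - 1 by omega]
    cases bO with
    | none => rfl
    | some b => simp only [finalizeB]; split <;> omega
  | succ m ih =>
    rw [PySem.List.pyRange_one_cons (by omega), List.foldl_cons, List.foldl_cons]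
    have e1 : PySem.List.pyGetD (esL arr n.toNat n.toNat) (j-1) false = esF arr (j-1).toNat := by
      unfold esL; rw [read_mapRange _ _ _ _ (by omega) (by omega)]
      rw [if_pos (by omega)]
    have e2 : PySem.List.pyGetD (sfL arr n.toNat 0) j 0 = sfV arr n.toNat j.toNat := by
      unfold sfL; rw [read_mapRange _ _ _ _ (by omega) (by omega)]
      rw [if_pos (by omega)]
    have e3 : SF arr (n.toNat-1) - sfV arr n.toNat j.toNat = SF arr (j-1).toNat := by
      unfold sfV
      rw [if_neg (by omega), show j.toNat - 1 = (j-1).toNat by omega]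
      ring
    have hstepA : stepA3 (esL arr n.toNat n.toNat) (sfL arr n.toNat 0) (SF arr (n.toNat-1)) bestA j
        = (if esF arr (j-1).toNat then (if SF arr (j-1).toNat < bestA then SF arr (j-1).toNat else bestA) else bestA) := by
      unfold stepA3
      rw [e1, e2, e3]
    have hstepB : stepB arr (pmF arr (j-1).toNat, SF arr (j-1).toNat, esF arr (j-1).toNat, bO) j
        = (pmF arr j.toNat, SF arr j.toNat, esF arr j.toNat,
           updBest (SF arr (j-1).toNat) (esF arr (j-1).toNat) bO) := by
      simp only [stepB]
      rw [updBest_def]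
      have ea : PySem.List.pyGetD arr j 0 = gA arr j.toNat := by
        unfold gA; rw [show ((j.toNat : Int)) = j by omega]
      rw [ea]
      have ec : (if gA arr j.toNat < pmF arr (j-1).toNat then gA arr j.toNat else pmF arr (j-1).toNat)
          = pmF arr j.toNat := by
        rw [show j.toNat = (j-1).toNat + 1 by omega]
        simp only [pmF]
        split <;> omega
      rw [ec]
      rw [show (esF arr (j-1).toNat || decide (gA arr j.toNat > pmF arr (j-1).toNat)) = esF arr j.toNat by
        rw [show j.toNat = (j-1).toNat + 1 by omega]; simp [esF]]
      rw [show SF arr (j-1).toNat + pmF arr j.toNat = SF arr j.toNat by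
        rw [show j.toNat = (j-1).toNat + 1 by omega]; simp [SF]]
    rw [hstepA, hstepB]
    have hR' := updR (SF arr (n.toNat - 1)) (SF arr (j-1).toNat) bestA (esF arr (j-1).toNat) bO hR
    have h' := ih (j+1) (by omega) (by omega) _ _ hR' (by omega)
    rw [show (j+1-1 : Int) = j by ring] at h'
    exact h'

theorem main_eq (n : Int) (arr : List Int) (hn1 : 1 ≤ n) (_hn2 : n ≤ (arr.length : Int)) :
    minimise_sum n arr = minimise_sum_alt n arr := by
  have hg0 : PySem.List.pyGetD arr 0 0 = pmF arr 0 := by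
    unfold pmF gA; norm_num
  have i1 : PySem.List.pySetD (List.replicate n.toNat (0:Int)) 0 (PySem.List.pyGetD arr 0 0)
      = pmL arr n.toNat 1 := by
    rw [PySem.List.pySetD_of_nonneg _ _ (by omega)]
    apply List.ext_getElem
    · simp [pmL]
    · intro i hi1 hi2
      simp only [List.length_set, List.length_replicate] at hi1
      simp only [pmL, Int.toNat_zero, List.getElem_set, List.getElem_map, List.getElem_range, List.getElem_replicate]
      by_cases h : i = 0
      · subst h
        rw [if_pos (by omega), if_pos (by omega), hg0]
      · simp only [if_neg (show ¬(0 = i) by omega), if_neg (show ¬(i < 1) by omega)]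
  have i2 : List.replicate n.toNat false = esL arr n.toNat 1 := by
    apply List.ext_getElem
    · simp [esL]
    · intro i hi1 hi2
      simp only [esL, List.getElem_map, List.getElem_range, List.getElem_replicate]
      by_cases h : i = 0
      · subst h; rw [if_pos (by omega)]; rfl
      · rw [if_neg (by omega)]
  have i3 : PySem.List.pySetD (List.replicate (n+1).toNat (0:Int)) n 0 = sfL arr n.toNat n.toNat := by
    rw [PySem.List.pySetD_of_nonneg _ _ (by omega)]
    apply List.ext_getElem
    · simp [sfL]; omega
    · intro i hi1 hi2
      simp only [List.length_set, List.length_replicate] at hi1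
      simp only [sfL, List.getElem_set, List.getElem_map, List.getElem_range, List.getElem_replicate]
      by_cases h : i = n.toNat
      · rw [if_pos (by omega), if_pos (by omega)]
        subst h
        unfold sfV
        rw [if_neg (by omega)]
        omega
      · simp only [if_neg (show ¬(n.toNat = i) by omega), if_neg (show ¬(n.toNat ≤ i) by omega)]
  have htot : PySem.List.pyGetD (sfL arr n.toNat 0) 0 0 = SF arr (n.toNat - 1) := by
    unfold sfL
    rw [read_mapRange _ _ _ _ (by omega) (by omega), if_pos (by omega)]
    unfold sfV
    norm_num
  have h1' := loop1 arr n 1 (by omega) (by omega)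
  norm_num at h1'
  have h2' := loop2 arr n (n-1) (by omega) (by omega) (by omega)
  rw [show (n-1+1 : Int) = n by ring] at h2'
  have h3' := loop3 arr n 1 (by omega) (by omega) (SF arr (n.toNat - 1)) none rfl
  norm_num at h3'
  simp only [minimise_sum, minimise_sum_alt]
  rw [i1, i2, h1', i3]
  simp only
  rw [h2', htot, h3', hg0]
  rfl

-- ===== VERDICT (by name: the statement is the Claim_ definition above) =====
theorem minimise_sum_spec : Claim_equal_minimise_sum := by
  intro n arr _hdom hpre
  unfold Pre_minimise_sum at hpre
  unfold Spec_minimise_sum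
  exact main_eq n arr hpre.1 hpre.2
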